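-- pv_equiv track=rewrite | github.com/Tducdz/Code | Codeptit/Python/D-Lab/PY01066.py | check
-- ===== SOURCE A (Python) =====
-- def check(s1):
--     s2 = s1[::-1]
--     for i in range(1, len(s1)):
--         a = ord(s1[i]) - ord(s1[i - 1])
--         b = ord(s2[i]) - ord(s2[i - 1])
--         if abs(a) != abs(b):
--             return False
--     return True
-- ===== SOURCE B (Python) =====
-- def check(s1):
--     i, j = 0, len(s1) - 1
--     while i + 1 < j:
--         if abs(ord(s1[i + 1]) - ord(s1[i])) != abs(ord(s1[j]) - ord(s1[j - 1])):
--             return False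
--         i += 1
--         j -= 1
--     return True
-- ===== Notes on version B (the rewrite author's own statement) =====
-- stated objective: alternative
-- what changed: B replaces A's reversed-string construction and full-length paired scan by an in-place two-pointer inward scan that compares the adjacent difference at the front pointer with the one at the back pointer, using O(1) extra space and half the iterations.
import Mathlib
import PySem

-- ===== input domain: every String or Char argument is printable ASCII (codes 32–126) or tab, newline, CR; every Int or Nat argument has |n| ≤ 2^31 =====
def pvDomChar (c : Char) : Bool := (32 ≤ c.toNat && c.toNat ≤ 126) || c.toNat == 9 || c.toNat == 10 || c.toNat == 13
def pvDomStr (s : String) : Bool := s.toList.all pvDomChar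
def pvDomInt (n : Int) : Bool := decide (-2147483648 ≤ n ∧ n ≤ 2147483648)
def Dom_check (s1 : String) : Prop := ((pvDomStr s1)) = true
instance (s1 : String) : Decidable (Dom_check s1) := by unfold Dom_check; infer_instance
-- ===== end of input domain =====

-- B replaces A's reversed-string construction and full paired scan by an in-place
-- two-pointer inward scan with O(1) extra space and half the iterations (objective: alternative).

-- ===== PORT A =====
-- ord(c)
def pvOrd (c : Char) : Int := c.toNat

-- the for-loop over range(1, len(s1)) with early 'return False'; all indices the
-- Python loop touches are in range, so List.getD with a dummy default is exact here
def checkGo (l r : List Char) (n i : Nat) : Bool :=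
  if i < n then
    let a : Int := pvOrd (l.getD i 'A') - pvOrd (l.getD (i - 1) 'A')
    let b : Int := pvOrd (r.getD i 'A') - pvOrd (r.getD (i - 1) 'A')
    if |a| ≠ |b| then false else checkGo l r n (i + 1)
  else true
termination_by n - i

def check (s1 : String) : Bool :=
  let l := s1.toList
  let s2 := l.reverse      -- s2 = s1[::-1]
  checkGo l s2 l.length 1

-- ===== PORT B =====
-- the while-loop 'while i + 1 < j' with the two converging pointers; all indices the
-- Python loop touches are in range, so List.getD with a dummy default is exact here
def altGo (l : List Char) (i j : Nat) : Bool :=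
  if i + 1 < j then
    if |pvOrd (l.getD (i + 1) 'A') - pvOrd (l.getD i 'A')| ≠
       |pvOrd (l.getD j 'A') - pvOrd (l.getD (j - 1) 'A')| then false
    else altGo l (i + 1) (j - 1)
  else true
termination_by j - i

def check_alt (s1 : String) : Bool :=
  altGo s1.toList 0 (s1.toList.length - 1)   -- i, j = 0, len(s1) - 1

-- ===== PRECONDITION & SPEC =====
def Spec_check (s1 : String) (out : Bool) : Prop := out = check_alt s1
instance (s1 : String) (out : Bool) : Decidable (Spec_check s1 out) := by unfold Spec_check; infer_instance

-- ===== CLAIM =====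
def Claim_equal_check : Prop := ∀ (s1 : String), Dom_check s1 → Spec_check s1 (check s1)

-- ===== LEMMAS AND PROOFS =====

-- the absolute adjacent difference at position k
def pvD (l : List Char) (k : Nat) : Int :=
  |pvOrd (l.getD (k + 1) 'A') - pvOrd (l.getD k 'A')|

theorem checkGo_iff (l r : List Char) (n i : Nat) :
    checkGo l r n i = true ↔
      ∀ j, i ≤ j → j < n →
        |pvOrd (l.getD j 'A') - pvOrd (l.getD (j - 1) 'A')| =
        |pvOrd (r.getD j 'A') - pvOrd (r.getD (j - 1) 'A')| := by
  fun_induction checkGo l r n i with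
  | case1 i hi a b hne =>
    simp only [Bool.false_eq_true, false_iff]
    intro hall
    exact hne (hall i le_rfl hi)
  | case2 i hi a b hne ih =>
    have hne' := of_not_not hne
    rw [ih]
    constructor
    · intro hall j hij hjn
      rcases Nat.eq_or_lt_of_le hij with h | h
      · exact h ▸ hne'
      · exact hall j h hjn
    · intro hall j hij hjn
      exact hall j (Nat.le_of_succ_le hij) hjn
  | case3 i hi =>
    simp only [true_iff]
    intro j hij hjn
    omega

theorem altGo_iff (l : List Char) (i j : Nat) :
    altGo l i j = true ↔
      ∀ k, i ≤ k → k + 1 < i + j - k → pvD l k = pvD l (i + j - k - 1) := by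
  fun_induction altGo l i j with
  | case1 i j hij hne =>
    simp only [Bool.false_eq_true, false_iff]
    intro hall
    have h := hall i le_rfl (by omega)
    have h1 : i + j - i = j := by omega
    have h2 : j - 1 + 1 = j := by omega
    rw [h1] at h
    exact hne (by simpa [pvD, h2] using h)
  | case2 i j hij hne ih =>
    have hne' := of_not_not hne
    have hsum : i + 1 + (j - 1) = i + j := by omega
    rw [ih]
    constructor
    · intro hall k hik hk
      rcases Nat.eq_or_lt_of_le hik with h | h
      · have h1 : i + j - k = j := by omega
        have h2 : j - 1 + 1 = j := by omega
        rw [h1]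
        simpa [pvD, h2, ← h] using hne'
      · have := hall k h (by omega)
        rwa [hsum] at this
    · intro hall k hik hk
      rw [hsum]
      exact hall k (by omega) (by omega)
  | case3 i j hij =>
    simp only [true_iff]
    intro k hik hk
    omega

theorem getD_reverse (l : List Char) (j : Nat) (h : j < l.length) (d : Char) :
    l.reverse.getD j d = l.getD (l.length - 1 - j) d := by
  rw [List.getD_eq_getElem _ _ (by simpa using h),
      List.getD_eq_getElem _ _ (by omega), List.getElem_reverse]

-- A's loop computes exactly the full palindrome condition on pvD
theorem check_iff (s1 : String) :
    check s1 = true ↔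
      ∀ k, k + 1 < s1.toList.length →
        pvD s1.toList k = pvD s1.toList (s1.toList.length - 2 - k) := by
  rw [check, checkGo_iff]
  constructor
  · intro h k hk
    have hj := h (k + 1) (by omega) hk
    rw [getD_reverse _ _ (by omega), getD_reverse _ _ (by omega)] at hj
    have e1 : s1.toList.length - 1 - (k + 1) = s1.toList.length - 2 - k := by omega
    have e2 : s1.toList.length - 1 - (k + 1 - 1) = s1.toList.length - 2 - k + 1 := by omega
    rw [e1, e2] at hj
    simpa [pvD, abs_sub_comm] using hj
  · intro h j h1j hjn
    have hk := h (j - 1) (by omega)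
    rw [getD_reverse _ _ (by omega), getD_reverse _ _ (by omega)]
    have e0 : j - 1 + 1 = j := by omega
    have e1 : s1.toList.length - 1 - j = s1.toList.length - 2 - (j - 1) := by omega
    have e2 : s1.toList.length - 1 - (j - 1) = s1.toList.length - 2 - (j - 1) + 1 := by omega
    rw [e1, e2]
    simpa [pvD, e0, abs_sub_comm] using hk

theorem check_eq_alt (s1 : String) : check s1 = check_alt s1 := by
  rw [Bool.eq_iff_iff, check_iff, check_alt, altGo_iff]
  set l := s1.toList
  set n := l.length
  constructor
  · intro h k _ hk
    have e : 0 + (n - 1) - k - 1 = n - 2 - k := by omega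
    rw [e]
    exact h k (by omega)
  · intro h k hk
    by_cases hhalf : k + 1 < 0 + (n - 1) - k
    · have := h k (Nat.zero_le _) hhalf
      have e : 0 + (n - 1) - k - 1 = n - 2 - k := by omega
      rwa [e] at this
    · by_cases hmid : k = n - 2 - k
      · rw [← hmid]
      · -- k is in the upper half: use the reflected index k' = n - 2 - k
        have hk' : n - 2 - k + 1 < 0 + (n - 1) - (n - 2 - k) := by omega
        have := h (n - 2 - k) (Nat.zero_le _) hk'
        have e : 0 + (n - 1) - (n - 2 - k) - 1 = k := by omega
        rw [e] at this
        exact this.symm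

-- ===== VERDICT =====
theorem check_spec : Claim_equal_check := by
  intro s1 _
  unfold Spec_check
  exact check_eq_alt s1
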